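-- pv_equiv track=rewrite | github.com/Aboele13/CompleteW101Gear | utils.py | tally_gear_sets
-- ===== SOURCE A (Python) =====
-- def tally_gear_sets(items):
--
--     counting_set_pieces = dict()
--
--     # iterate through and count occurrence of each gear set
--     for item in items:
--         curr_gear_set = item['Gear Set']
--         if curr_gear_set != 'No Gear Set':
--             if curr_gear_set not in counting_set_pieces:
--                 counting_set_pieces[curr_gear_set] = 1
--             else:
--                 counting_set_pieces[curr_gear_set] += 1
--
--     # if no pieces belong to gear set, simply return this
--     if len(counting_set_pieces) == 0:
--         return "No Gear Set"
--
--     # else, string them together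
--     total_gear_sets = ''
--
--     # alphabetize the gear sets
--     counting_set_pieces = {gear_set: counting_set_pieces[gear_set] for gear_set in sorted(counting_set_pieces)}
--
--     for gear_set in counting_set_pieces:
--         if total_gear_sets:
--             total_gear_sets = f"{total_gear_sets}, {gear_set} ({counting_set_pieces[gear_set]}x)"
--         else:
--             total_gear_sets = f"{gear_set} ({counting_set_pieces[gear_set]}x)"
--
--     return total_gear_sets
-- ===== SOURCE B (Python) =====
-- def tally_gear_sets(items):
--     # sort-then-group-consecutive instead of hash-count-then-sort-keys
--     names = sorted(item['Gear Set'] for item in items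
--                    if item['Gear Set'] != 'No Gear Set')
--     if not names:
--         return "No Gear Set"
--     parts = []
--     rest = names
--     while rest:
--         name = rest[0]
--         run = 1
--         rest = rest[1:]
--         while rest and rest[0] == name:
--             run += 1
--             rest = rest[1:]
--         parts.append(f"{name} ({run}x)")
--     return ", ".join(parts)
-- ===== Notes on version B (the rewrite author's own statement) =====
-- stated objective: alternative
-- what changed: Replaces A's dict-count-then-sort-keys with filter + sort the name list once, then a single pass grouping consecutive equal names into '(Nx)' parts joined by ', '.
import Mathlib
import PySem

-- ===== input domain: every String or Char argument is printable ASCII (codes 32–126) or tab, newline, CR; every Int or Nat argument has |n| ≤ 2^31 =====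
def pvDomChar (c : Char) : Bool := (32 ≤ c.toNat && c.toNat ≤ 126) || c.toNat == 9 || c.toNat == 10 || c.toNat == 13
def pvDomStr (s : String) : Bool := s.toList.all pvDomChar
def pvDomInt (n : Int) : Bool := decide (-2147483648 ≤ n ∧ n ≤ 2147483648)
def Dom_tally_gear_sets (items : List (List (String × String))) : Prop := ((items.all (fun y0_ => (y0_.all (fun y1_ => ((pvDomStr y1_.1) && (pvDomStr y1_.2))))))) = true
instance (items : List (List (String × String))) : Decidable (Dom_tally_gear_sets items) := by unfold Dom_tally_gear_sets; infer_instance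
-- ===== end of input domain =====

-- B replaces A's hash-count-then-sort-keys strategy by filter, sort, then one pass grouping
-- consecutive equal names (objective: alternative decomposition, same result).


-- ===== PORT A =====
def tally_gear_sets (items : List (List (String × String))) : String :=
  -- counting loop: dict of gear-set name -> occurrence count
  let counting := items.foldl (fun d item =>
    match (PySem.Dict.mk item).get? "Gear Set" with
    | none => d  -- item['Gear Set'] KeyError: excluded by Pre_
    | some curr =>
      if curr ≠ "No Gear Set" then
        if !(d.contains curr) then d.insert curr 1
        else d.insert curr (d.getD curr 0 + 1)
      else d) PySem.Dict.empty
  if counting.size = 0 then "No Gear Set"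
  else
    -- alphabetize the keys, then string the entries together with an accumulator
    (PySem.List.sorted counting.keys (fun k => k)).foldl
      (fun total k =>
        if total ≠ "" then
          PySem.Str.join "" [total, ", ", k, " (", PySem.Int.toStr (counting.getD k 0), "x)"]
        else
          PySem.Str.join "" [k, " (", PySem.Int.toStr (counting.getD k 0), "x)"]) ""

-- ===== PORT B =====
-- inner while loop of Source B: consume the leading run of `name`, returning (run, rest)
def pvRunAux (name : String) (rest : List String) (run : Int) : Int × List String :=
  match rest with
  | [] => (run, [])
  | y :: t => if y == name then pvRunAux name t (run + 1) else (run, y :: t)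

-- needed by pvGroupLoop's decreasing_by
theorem pvRunAux_len (name : String) : ∀ (l : List String) (run : Int),
    ((pvRunAux name l run).2).length ≤ l.length := by
  intro l
  induction l with
  | nil => intro run; simp [pvRunAux]
  | cons y t ih =>
    intro run
    by_cases h : (y == name) = true
    · simpa [pvRunAux, h] using Nat.le_succ_of_le (ih (run + 1))
    · simp [pvRunAux, h]

-- outer while loop of Source B: emit one "name (runx)" part per run of equal names
def pvGroupLoop (rest : List String) (parts : List String) : List String :=
  match rest with
  | [] => parts
  | name :: t =>
    let p := pvRunAux name t 1
    pvGroupLoop p.2 (parts ++ [PySem.Str.join "" [name, " (", PySem.Int.toStr p.1, "x)"]])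
termination_by rest.length
decreasing_by
  simpa using Nat.lt_succ_of_le (pvRunAux_len name t 1)

def tally_gear_sets_alt (items : List (List (String × String))) : String :=
  let names := PySem.List.sorted (items.filterMap (fun item =>
      match (PySem.Dict.mk item).get? "Gear Set" with
      | none => none  -- item['Gear Set'] KeyError: excluded by Pre_
      | some g => if g ≠ "No Gear Set" then some g else none)) (fun k => k)
  if names = [] then "No Gear Set"
  else PySem.Str.join ", " (pvGroupLoop names [])

-- ===== PRECONDITION & SPEC =====
-- Pre_ excludes exactly the inputs where some item lacks the 'Gear Set' key, on which A raises KeyError.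
def Pre_tally_gear_sets (items : List (List (String × String))) : Prop :=
  (items.all (fun item => (PySem.Dict.mk item).contains "Gear Set")) = true
instance (items : List (List (String × String))) : Decidable (Pre_tally_gear_sets items) := by unfold Pre_tally_gear_sets; infer_instance

def pvWitness_tally_gear_sets : (List (List (String × String))) :=
  [[("Gear Set", "Alpha")], [("Gear Set", "No Gear Set")], [("Gear Set", "Alpha")]]

def Spec_tally_gear_sets (items : List (List (String × String))) (out : String) : Prop := out = tally_gear_sets_alt items
instance (items : List (List (String × String))) (out : String) : Decidable (Spec_tally_gear_sets items out) := by unfold Spec_tally_gear_sets; infer_instance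

-- ===== CLAIM (what is proved, stated in full; the proofs are below) =====
def Claim_equal_tally_gear_sets : Prop := ∀ (items : List (List (String × String))), Dom_tally_gear_sets items → Pre_tally_gear_sets items → Spec_tally_gear_sets items (tally_gear_sets items)

-- ===== LEMMAS AND PROOFS =====

-- the list of gear-set names A counts and B sorts, in item order
def pvNames (items : List (List (String × String))) : List String :=
  items.filterMap (fun item =>
    match (PySem.Dict.mk item).get? "Gear Set" with
    | none => none
    | some g => if g ≠ "No Gear Set" then some g else none)

-- the formatted entry for one gear set
def pvFmt (name : String) (n : Int) : String :=
  PySem.Str.join "" [name, " (", PySem.Int.toStr n, "x)"]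

theorem pvJoin_empty_flatten : ∀ (ps : List (List Char)), PySem.Chars.join [] ps = ps.flatten := by
  intro ps
  induction ps with
  | nil => simp [PySem.Chars.join_nil]
  | cons p ps ih =>
    cases ps with
    | nil => simp [PySem.Chars.join_singleton]
    | cons q rest => simp [PySem.Chars.join_cons_cons, ih]

theorem pvJoin_cons_flatten (sep : List Char) : ∀ (p : List Char) (ps : List (List Char)),
    PySem.Chars.join sep (p :: ps) = p ++ (ps.map (fun q => sep ++ q)).flatten := by
  intro p ps
  induction ps generalizing p with
  | nil => simp [PySem.Chars.join_singleton]
  | cons q rest ih => simp [PySem.Chars.join_cons_cons, ih q]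

theorem pvFmt_ne_empty (name : String) (n : Int) : pvFmt name n ≠ "" := by
  intro h
  have h2 := congrArg String.toList h
  simp [pvFmt, PySem.Str.toList_join, pvJoin_empty_flatten] at h2

theorem pvLoopA (items : List (List (String × String)))
    (h : ∀ item ∈ items, (PySem.Dict.mk item).contains "Gear Set" = true) :
    ∀ (d : PySem.Dict String Int),
    items.foldl (fun d item =>
      match (PySem.Dict.mk item).get? "Gear Set" with
      | none => d
      | some curr =>
        if curr ≠ "No Gear Set" then
          if !(d.contains curr) then d.insert curr 1
          else d.insert curr (d.getD curr 0 + 1)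
        else d) d
    = (pvNames items).foldl (fun d x => d.insert x (d.getD x 0 + 1)) d := by
  induction items with
  | nil => intro d; simp [pvNames]
  | cons item rest ih =>
    intro d
    have hc : (PySem.Dict.mk item).contains "Gear Set" = true := h item (by simp)
    rw [PySem.Dict.contains_eq_isSome_get?] at hc
    obtain ⟨g, hg⟩ := Option.isSome_iff_exists.mp hc
    have hrest : ∀ item ∈ rest, (PySem.Dict.mk item).contains "Gear Set" = true := by
      intro i hi; exact h i (by simp [hi])
    by_cases hs : g = "No Gear Set"
    · simp only [List.foldl_cons, pvNames, List.filterMap_cons, hg, hs]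
      simpa [pvNames] using ih hrest d
    · have hif : (if (PySem.Dict.contains d g) = false then d.insert g 1
          else d.insert g (d.getD g 0 + 1)) = d.insert g (d.getD g 0 + 1) := by
        by_cases hcon : d.contains g
        · simp [hcon]
        · have h0 : d.getD g 0 = 0 :=
            PySem.Dict.getD_of_not_contains d 0 (by simpa using hcon)
          simp [hcon, h0]
      simp only [List.foldl_cons, pvNames, List.filterMap_cons, hg, Bool.not_eq_true', ite_not, if_neg hs, hif]
      simpa [pvNames] using ih hrest (d.insert g (d.getD g 0 + 1))


theorem pvRunAux_eq (name : String) : ∀ (l : List String) (run : Int),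
    pvRunAux name l run = (run + ((l.takeWhile (· == name)).length : Int), l.dropWhile (· == name)) := by
  intro l
  induction l with
  | nil => intro run; simp [pvRunAux]
  | cons y t ih =>
    intro run
    by_cases hy : (y == name) = true
    · simp [pvRunAux, hy, ih (run + 1)]
      ring
    · simp [pvRunAux, hy]

theorem pvGroup_eq : ∀ (S : List String), S.Pairwise (· ≤ ·) → ∀ (parts : List String),
    pvGroupLoop S parts
      = parts ++ (PySem.List.sorted (PySem.Set.ofList S) (fun k => k)).map
          (fun k => pvFmt k ((S.count k : Int))) := by
  suffices h : ∀ (n : Nat) (S : List String), S.length ≤ n → S.Pairwise (· ≤ ·) → ∀ parts,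
      pvGroupLoop S parts
        = parts ++ (PySem.List.sorted (PySem.Set.ofList S) (fun k => k)).map
            (fun k => pvFmt k ((S.count k : Int))) by
    intro S hp parts; exact h S.length S le_rfl hp parts
  intro n
  induction n with
  | zero =>
    intro S hlen _ parts
    have : S = [] := List.eq_nil_of_length_eq_zero (Nat.le_zero.mp hlen)
    subst this
    simp [pvGroupLoop, PySem.List.sorted_eq_nil_iff]
  | succ n ih =>
    intro S hlen hp parts
    match S with
    | [] => simp [pvGroupLoop, PySem.List.sorted_eq_nil_iff]
    | x :: t =>
      have hpt : t.Pairwise (· ≤ ·) := hp.of_cons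
      have hxle : ∀ y ∈ t, x ≤ y := fun y hy => List.rel_of_pairwise_cons hp hy
      set tw := t.takeWhile (· == x) with htw
      set rest' := t.dropWhile (· == x) with hrest'
      have hsplit : tw ++ rest' = t := List.takeWhile_append_dropWhile
      have htweq : ∀ y ∈ tw, y = x := by
        intro y hy
        have := List.mem_takeWhile_imp hy
        simpa using this
      have hrest'sub : ∀ y ∈ rest', y ∈ t := by
        intro y hy; rw [← hsplit]; exact List.mem_append_right _ hy
      have hprest' : rest'.Pairwise (· ≤ ·) := by
        have := hsplit ▸ hpt
        exact (List.pairwise_append.mp this).2.1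
      have hlt : ∀ y ∈ rest', x < y := by
        intro y hy
        have hrne : rest' ≠ [] := List.ne_nil_of_mem hy
        obtain ⟨z, r, hr⟩ := List.exists_cons_of_ne_nil hrne
        have hd := List.head_dropWhile_not (fun y => y == x) (l := t)
          (by rw [← hrest']; exact hrne)
        have hzx : (z == x) = false := by
          simpa [← hrest', hr] using hd
        have hzx' : z ≠ x := by simpa using hzx
        have hzt : z ∈ t := hrest'sub z (by rw [hr]; simp)
        have hxz : x < z := lt_of_le_of_ne (hxle z hzt) (Ne.symm hzx')
        rw [hr] at hy
        rcases List.mem_cons.mp hy with h1 | h1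
        · exact h1 ▸ hxz
        · have : z ≤ y := List.rel_of_pairwise_cons (hr ▸ hprest') h1
          exact lt_of_lt_of_le hxz this
      have hne : ∀ y ∈ rest', y ≠ x := fun y hy => ne_of_gt (hlt y hy)
      -- counts
      have hcount_tw : tw.count x = tw.length := by
        rw [List.count_eq_length]
        intro y hy; simp [htweq y hy]
      have hcount_rest : rest'.count x = 0 :=
        List.count_eq_zero.mpr (fun hx => (hne x hx) rfl)
      have hcountx : (x :: t).count x = 1 + tw.length := by
        rw [← hsplit]
        simp [List.count_append, hcount_tw, hcount_rest]
        omega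
      have hcountk : ∀ k ∈ rest', (x :: t).count k = rest'.count k := by
        intro k hk
        have hkx : k ≠ x := hne k hk
        have : tw.count k = 0 := by
          rw [List.count_eq_zero]
          intro hmem; exact hkx (htweq k hmem)
        rw [← hsplit]
        simp [List.count_append, this, Ne.symm hkx]
      -- sorted set decomposition
      have hsorted : PySem.List.sorted (PySem.Set.ofList (x :: t)) (fun k => k)
          = x :: PySem.List.sorted (PySem.Set.ofList rest') (fun k => k) := by
        apply PySem.List.sorted_eq_of_perm_of_pairwise_lt
        · rw [List.perm_ext_iff_of_nodup]
          · intro a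
            simp only [List.mem_cons, PySem.List.mem_sorted, PySem.Set.mem_ofList]
            constructor
            · rintro (rfl | ha)
              · exact Or.inl rfl
              · exact Or.inr (hrest'sub a ha)
            · rintro (rfl | ha)
              · exact Or.inl rfl
              · rw [← hsplit] at ha
                rcases List.mem_append.mp ha with h1 | h1
                · exact Or.inl (htweq a h1)
                · exact Or.inr h1
          · constructor
            · intro a ha heq
              have hmem := (PySem.Set.mem_ofList _ _).mp ((PySem.List.mem_sorted _ _ _ a).mp ha)
              exact hne a hmem heq.symm
            · exact ((PySem.List.sorted_perm _ _ _).nodup_iff).mpr (PySem.Set.nodup_ofList _)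
          · exact PySem.Set.nodup_ofList _
        · constructor
          · intro b hb
            exact hlt b ((PySem.Set.mem_ofList _ _).mp ((PySem.List.mem_sorted _ _ _ b).mp hb))
          · exact PySem.List.sorted_ofList_pairwise_lt rest'
      -- unfold one step of pvGroupLoop
      have hlen' : rest'.length ≤ n := by
        have h1 : rest'.length ≤ t.length := by
          rw [← hsplit]; simp
        have h2 : t.length ≤ n := by simpa using Nat.le_of_succ_le_succ hlen
        exact le_trans h1 h2
      rw [pvGroupLoop]
      simp only [pvRunAux_eq, ← htw, ← hrest']
      rw [ih rest' hlen' hprest' _, hsorted]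
      have hmapeq : (PySem.List.sorted (PySem.Set.ofList rest') (fun k => k)).map
            (fun k => pvFmt k ((rest'.count k : Int)))
          = (PySem.List.sorted (PySem.Set.ofList rest') (fun k => k)).map
            (fun k => pvFmt k (((x :: t).count k : Int))) := by
        apply List.map_congr_left
        intro k hk
        rw [hcountk k ((PySem.Set.mem_ofList _ _).mp ((PySem.List.mem_sorted _ _ _ k).mp hk))]
      rw [hmapeq]
      simp [pvFmt, hcountx]

theorem pvStrFold (v : String → String) :
    ∀ (ks : List String) (acc : String), acc ≠ "" →
    (ks.foldl (fun total k =>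
        if total ≠ "" then PySem.Str.join "" [total, ", ", k, " (", v k, "x)"]
        else PySem.Str.join "" [k, " (", v k, "x)"]) acc)
      = PySem.Str.join "" (acc :: ks.map (fun k => PySem.Str.join "" [", ", k, " (", v k, "x)"])) := by
  intro ks
  induction ks with
  | nil =>
    intro acc hacc
    apply String.toList_inj.mp
    simp [PySem.Str.toList_join]
  | cons k kt ih =>
    intro acc hacc
    have hstep : ¬ (PySem.Str.join "" [acc, ", ", k, " (", v k, "x)"]) = "" := by
      intro h
      have h2 := congrArg String.toList h
      simp [PySem.Str.toList_join, pvJoin_empty_flatten] at h2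
    simp only [ite_not] at ih ⊢
    simp only [List.foldl_cons, if_neg hacc]
    rw [ih _ hstep]
    apply String.toList_inj.mp
    simp [PySem.Str.toList_join, pvJoin_empty_flatten]


theorem pvJoinComma (c : String → Int) (k0 : String) (kt : List String) :
    PySem.Str.join "" (pvFmt k0 (c k0) :: kt.map (fun k => PySem.Str.join "" [", ", k, " (", PySem.Int.toStr (c k), "x)"]))
    = PySem.Str.join ", " ((k0 :: kt).map (fun k => pvFmt k (c k))) := by
  apply String.toList_inj.mp
  rw [PySem.Str.toList_join, PySem.Str.toList_join]
  rw [List.map_cons, List.map_cons, pvJoin_cons_flatten, List.map_cons, pvJoin_cons_flatten]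
  congr 1
  rw [List.map_map, List.map_map, List.map_map, List.map_map]
  congr 1
  apply List.map_congr_left
  intro k hk
  simp [Function.comp, pvFmt, PySem.Str.toList_join, pvJoin_empty_flatten]

-- ===== VERDICT (by name: the statement is the Claim_ definition above) =====
theorem tally_gear_sets_spec : Claim_equal_tally_gear_sets := by
  intro items _ hpre
  show tally_gear_sets items = tally_gear_sets_alt items
  unfold Pre_tally_gear_sets at hpre
  have hpre' : ∀ item ∈ items, (PySem.Dict.mk item).contains "Gear Set" = true := by
    intro i hi
    simpa using (List.all_eq_true.mp hpre) i hi
  have hA : tally_gear_sets items =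
      (if (PySem.Dict.counter (pvNames items)).size = 0 then "No Gear Set"
       else
        (PySem.List.sorted (PySem.Dict.counter (pvNames items)).keys (fun k => k)).foldl
          (fun total k =>
            if total ≠ "" then
              PySem.Str.join "" [total, ", ", k, " (",
                PySem.Int.toStr ((PySem.Dict.counter (pvNames items)).getD k 0), "x)"]
            else
              PySem.Str.join "" [k, " (",
                PySem.Int.toStr ((PySem.Dict.counter (pvNames items)).getD k 0), "x)"]) "") := by
    simp only [tally_gear_sets]
    rw [pvLoopA items hpre', PySem.Dict.foldl_insert_getD_add_one_eq_counter]
  have hB : tally_gear_sets_alt items =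
      (if PySem.List.sorted (pvNames items) (fun k => k) = [] then "No Gear Set"
       else PySem.Str.join ", " (pvGroupLoop (PySem.List.sorted (pvNames items) (fun k => k)) [])) := rfl
  by_cases hN : pvNames items = []
  · rw [hA, hB, hN]
    simp [PySem.Dict.size, PySem.Dict.items_counter, PySem.List.sorted_eq_nil_iff]
  · -- nonempty case
    have hsz : (PySem.Dict.counter (pvNames items)).size ≠ 0 := by
      obtain ⟨x, t, hx⟩ := List.exists_cons_of_ne_nil hN
      have hmem : x ∈ PySem.Set.ofList (pvNames items) :=
        (PySem.Set.mem_ofList (pvNames items) x).mpr (by rw [hx]; exact List.mem_cons_self ..)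
      have : PySem.Set.ofList (pvNames items) ≠ [] := List.ne_nil_of_mem hmem
      simp [PySem.Dict.size, PySem.Dict.items_counter]
      intro hcon
      exact this hcon
    rw [hA, hB, if_neg hsz, if_neg (by simpa [PySem.List.sorted_eq_nil_iff] using hN)]
    -- A side: keys and values of the counter
    rw [PySem.Dict.keys_counter]
    simp only [PySem.Dict.getD_counter]
    -- B side: group the sorted names
    rw [pvGroup_eq _ (PySem.List.sorted_pairwise (pvNames items) (fun k => k)) []]
    simp only [List.nil_append]
    -- the two key lists agree
    have hperm : (PySem.Set.ofList (PySem.List.sorted (pvNames items) (fun k => k))).Perm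
        (PySem.Set.ofList (pvNames items)) := by
      rw [List.perm_ext_iff_of_nodup (PySem.Set.nodup_ofList _) (PySem.Set.nodup_ofList _)]
      intro a
      simp [PySem.Set.mem_ofList, PySem.List.mem_sorted]
    have hkeys : PySem.List.sorted (PySem.Set.ofList (PySem.List.sorted (pvNames items) (fun k => k))) (fun k => k)
        = PySem.List.sorted (PySem.Set.ofList (pvNames items)) (fun k => k) :=
      PySem.List.sorted_eq_sorted_of_perm _ _ _ (fun a b h => h) hperm
    rw [hkeys]
    -- the counts agree
    have hcnt : ∀ k, (PySem.List.sorted (pvNames items) (fun k => k)).count k = (pvNames items).count k :=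
      fun k => (PySem.List.sorted_perm (pvNames items) (fun k => k) false).count_eq k
    simp only [hcnt]
    -- A's accumulator fold is the comma-join
    obtain ⟨k0, kt, hK⟩ : ∃ k0 kt, PySem.List.sorted (PySem.Set.ofList (pvNames items)) (fun k => k) = k0 :: kt := by
      apply List.exists_cons_of_ne_nil
      rw [Ne, PySem.List.sorted_eq_nil_iff]
      obtain ⟨x, t, hx⟩ := List.exists_cons_of_ne_nil hN
      exact List.ne_nil_of_mem ((PySem.Set.mem_ofList (pvNames items) x).mpr
        (by rw [hx]; exact List.mem_cons_self ..))
    rw [hK]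
    rw [List.foldl_cons]
    rw [if_neg (by simp)]
    have hacc : PySem.Str.join "" [k0, " (", PySem.Int.toStr ((pvNames items).count k0 : Int), "x)"] ≠ "" :=
      pvFmt_ne_empty k0 _
    rw [pvStrFold (fun k => PySem.Int.toStr ((pvNames items).count k : Int)) kt _ hacc]
    exact pvJoinComma (fun k => ((pvNames items).count k : Int)) k0 kt
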